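-- pv_equiv track=rewrite | github.com/A1anMc/SGEDashboardJuly | app/services/scrapers/business_gov.py | _extract_org_types
-- ===== SOURCE A (Python) =====
-- from typing import List, Dict, Optional, Any
--
-- def _extract_org_types(text: str) -> List[str]:
--     """Extract organization types from text."""
--     text_lower = text.lower()
--     org_types = []
--
--     if any(word in text_lower for word in ['small business', 'sme']):
--         org_types.append("small_business")
--     if any(word in text_lower for word in ['medium business', 'medium enterprise']):
--         org_types.append("medium_business")
--     if any(word in text_lower for word in ['large business', 'large enterprise']):
--         org_types.append("large_business")
--     if any(word in text_lower for word in ['startup', 'start-up']):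
--         org_types.append("startup")
--     if any(word in text_lower for word in ['company', 'corporation']):
--         org_types.append("company")
--     if any(word in text_lower for word in ['individual', 'sole trader']):
--         org_types.append("individual")
--
--     return org_types if org_types else ["small_business"]
-- ===== SOURCE B (Python) =====
-- from typing import List
--
-- _KEYWORD_TABLE = [
--     ("small business", "small_business"), ("sme", "small_business"),
--     ("medium business", "medium_business"), ("medium enterprise", "medium_business"),
--     ("large business", "large_business"), ("large enterprise", "large_business"),
--     ("startup", "startup"), ("start-up", "startup"),
--     ("company", "company"), ("corporation", "company"),
--     ("individual", "individual"), ("sole trader", "individual"),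
-- ]
-- _LABELS = ["small_business", "medium_business", "large_business",
--            "startup", "company", "individual"]
--
-- def _extract_org_types(text: str) -> List[str]:
--     """Single sliding-window scan: walk the lowered text once, at each position
--     record the label of any keyword starting there, then emit found labels in
--     canonical order."""
--     t = text.lower()
--     found = set()
--     for i in range(len(t)):
--         for kw, label in _KEYWORD_TABLE:
--             if label not in found and t.startswith(kw, i):
--                 found.add(label)
--     out = [label for label in _LABELS if label in found]
--     return out or ["small_business"]
-- ===== Notes on version B (the rewrite author's own statement) =====
-- stated objective: alternative
-- what changed: Instead of six independent per-keyword substring tests, B makes one sliding-window scan over the lowered text, at each position recording in a set the label of any keyword starting there, then emits the found labels in canonical order (with the same empty-result fallback).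
import Mathlib
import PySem

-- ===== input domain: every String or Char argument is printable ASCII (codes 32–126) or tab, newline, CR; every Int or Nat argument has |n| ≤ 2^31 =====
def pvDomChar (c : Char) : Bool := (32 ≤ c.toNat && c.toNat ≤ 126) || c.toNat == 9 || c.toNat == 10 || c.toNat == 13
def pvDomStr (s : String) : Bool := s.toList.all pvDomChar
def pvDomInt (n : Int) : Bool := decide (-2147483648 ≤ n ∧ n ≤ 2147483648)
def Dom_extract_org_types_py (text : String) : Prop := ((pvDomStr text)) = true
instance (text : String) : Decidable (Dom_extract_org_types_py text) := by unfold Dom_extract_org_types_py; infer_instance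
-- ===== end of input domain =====

-- B replaces A's six per-keyword substring tests by a single sliding-window scan over the
-- lowered text that accumulates a set of matched labels, emitted afterwards in canonical
-- order (alternative decomposition; same observable result).

-- ===== PORT A =====
def extract_org_types_py (text : String) : List String :=
  let text_lower := PySem.Str.lower text
  let org_types : List String := []
  let org_types := if ["small business", "sme"].any (fun w => PySem.Str.isIn w text_lower) then
      org_types ++ ["small_business"] else org_types
  let org_types := if ["medium business", "medium enterprise"].any (fun w => PySem.Str.isIn w text_lower) then
      org_types ++ ["medium_business"] else org_types
  let org_types := if ["large business", "large enterprise"].any (fun w => PySem.Str.isIn w text_lower) then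
      org_types ++ ["large_business"] else org_types
  let org_types := if ["startup", "start-up"].any (fun w => PySem.Str.isIn w text_lower) then
      org_types ++ ["startup"] else org_types
  let org_types := if ["company", "corporation"].any (fun w => PySem.Str.isIn w text_lower) then
      org_types ++ ["company"] else org_types
  let org_types := if ["individual", "sole trader"].any (fun w => PySem.Str.isIn w text_lower) then
      org_types ++ ["individual"] else org_types
  if org_types = [] then ["small_business"] else org_types

-- ===== PORT B =====
-- Source B's _KEYWORD_TABLE (keyword chars, label) and _LABELS
def pvKeywordTable : List (List Char × String) :=
  [("small business".toList, "small_business"), ("sme".toList, "small_business"),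
   ("medium business".toList, "medium_business"), ("medium enterprise".toList, "medium_business"),
   ("large business".toList, "large_business"), ("large enterprise".toList, "large_business"),
   ("startup".toList, "startup"), ("start-up".toList, "startup"),
   ("company".toList, "company"), ("corporation".toList, "company"),
   ("individual".toList, "individual"), ("sole trader".toList, "individual")]

def pvLabels : List String :=
  ["small_business", "medium_business", "large_business", "startup", "company", "individual"]

-- inner 'for kw, label in _KEYWORD_TABLE' body at text position i;
-- t.startswith(kw, i) with 0 ≤ i is exactly 'kw is a prefix of t[i:]' = kw.isPrefixOf (tl.drop i)
def pvScanStep (tl : List Char) (s : PySem.Set String) (i : Nat) : PySem.Set String :=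
  pvKeywordTable.foldl (fun s kw =>
    if !(PySem.Set.contains s kw.2) && kw.1.isPrefixOf (tl.drop i) then PySem.Set.add s kw.2
    else s) s

def extract_org_types_py_alt (text : String) : List String :=
  let tl := (PySem.Str.lower text).toList
  -- 'for i in range(len(t))' : the indices are the naturals 0 .. len-1, exactly List.range
  let found := (List.range tl.length).foldl (pvScanStep tl) PySem.Set.empty
  let out := pvLabels.filter (fun lab => PySem.Set.contains found lab)
  if out = [] then ["small_business"] else out

-- ===== PRECONDITION & SPEC =====
def Spec_extract_org_types_py (text : String) (out : List String) : Prop := out = extract_org_types_py_alt text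
instance (text : String) (out : List String) : Decidable (Spec_extract_org_types_py text out) := by unfold Spec_extract_org_types_py; infer_instance

-- ===== CLAIM (what is proved, stated in full; the proofs are below) =====
def Claim_equal_extract_org_types_py : Prop := ∀ (text : String), Dom_extract_org_types_py text → Spec_extract_org_types_py text (extract_org_types_py text)

-- ===== LEMMAS AND PROOFS =====

-- every keyword in the table is nonempty
theorem pvTableNonEmpty : ∀ kw ∈ pvKeywordTable, kw.1 ≠ [] := by decide

-- membership after the inner fold over an arbitrary keyword table
theorem pvInnerMem (tbl : List (List Char × String)) (tl : List Char) (i : Nat)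
    (s : PySem.Set String) (L : String) :
    (L ∈ tbl.foldl (fun s kw =>
        if !(PySem.Set.contains s kw.2) && kw.1.isPrefixOf (tl.drop i) then PySem.Set.add s kw.2
        else s) s)
    ↔ L ∈ s ∨ ∃ kw ∈ tbl, kw.2 = L ∧ kw.1.isPrefixOf (tl.drop i) = true := by
  induction tbl generalizing s with
  | nil => simp
  | cons a tbl ih =>
    simp only [List.foldl_cons]
    by_cases hp : a.1.isPrefixOf (tl.drop i) = true
    · by_cases hc : PySem.Set.contains s a.2 = true
      · have hm : a.2 ∈ s := by simpa using hc
        rw [if_neg (by simp [hm]), ih]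
        constructor
        · rintro (h | ⟨kw, hkw, hh⟩)
          · exact Or.inl h
          · exact Or.inr ⟨kw, List.mem_cons_of_mem _ hkw, hh⟩
        · rintro (h | ⟨kw, hkw, hh2, hh3⟩)
          · exact Or.inl h
          · rcases List.mem_cons.mp hkw with rfl | hkw'
            · exact Or.inl (hh2 ▸ hm)
            · exact Or.inr ⟨kw, hkw', hh2, hh3⟩
      · have hnm : a.2 ∉ s := by simpa using hc
        rw [if_pos (by simp [hnm, hp]), ih]
        simp only [PySem.Set.mem_add]
        constructor
        · rintro ((h | rfl) | ⟨kw, hkw, hh⟩)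
          · exact Or.inl h
          · exact Or.inr ⟨a, by simp, rfl, hp⟩
          · exact Or.inr ⟨kw, List.mem_cons_of_mem _ hkw, hh⟩
        · rintro (h | ⟨kw, hkw, hh2, hh3⟩)
          · exact Or.inl (Or.inl h)
          · rcases List.mem_cons.mp hkw with rfl | hkw'
            · exact Or.inl (Or.inr hh2.symm)
            · exact Or.inr ⟨kw, hkw', hh2, hh3⟩
    · rw [if_neg (by simp [hp]), ih]
      constructor
      · rintro (h | ⟨kw, hkw, hh⟩)
        · exact Or.inl h
        · exact Or.inr ⟨kw, List.mem_cons_of_mem _ hkw, hh⟩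
      · rintro (h | ⟨kw, hkw, hh2, hh3⟩)
        · exact Or.inl h
        · rcases List.mem_cons.mp hkw with rfl | hkw'
          · exact absurd hh3 hp
          · exact Or.inr ⟨kw, hkw', hh2, hh3⟩

-- membership after the outer fold over the index list
theorem pvOuterMem (idxs : List Nat) (tl : List Char) (s : PySem.Set String) (L : String) :
    (L ∈ idxs.foldl (pvScanStep tl) s)
    ↔ L ∈ s ∨ ∃ i ∈ idxs, ∃ kw ∈ pvKeywordTable, kw.2 = L ∧ kw.1.isPrefixOf (tl.drop i) = true := by
  induction idxs generalizing s with
  | nil => simp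
  | cons i idxs ih =>
    simp only [List.foldl_cons]
    rw [ih]
    rw [show pvScanStep tl s i = pvKeywordTable.foldl (fun s kw =>
        if !(PySem.Set.contains s kw.2) && kw.1.isPrefixOf (tl.drop i) then PySem.Set.add s kw.2
        else s) s from rfl, pvInnerMem]
    constructor
    · rintro ((h | hkw) | ⟨j, hj, hrest⟩)
      · exact Or.inl h
      · exact Or.inr ⟨i, by simp, hkw⟩
      · exact Or.inr ⟨j, List.mem_cons_of_mem _ hj, hrest⟩
    · rintro (h | ⟨j, hj, hrest⟩)
      · exact Or.inl (Or.inl h)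
      · rcases List.mem_cons.mp hj with rfl | hj'
        · exact Or.inl (Or.inr hrest)
        · exact Or.inr ⟨j, hj', hrest⟩

-- bounded position scan = Python substring containment, for a nonempty needle
theorem pvScanIff (sub tl : List Char) (h : sub ≠ []) :
    (∃ i ∈ List.range tl.length, sub.isPrefixOf (tl.drop i) = true)
    ↔ PySem.Chars.isIn sub tl = true := by
  rw [← PySem.Chars.exists_prefix_drop_iff_isIn]
  constructor
  · rintro ⟨i, _, hp⟩
    exact ⟨i, List.isPrefixOf_iff_prefix.mp hp⟩
  · rintro ⟨j, hp⟩
    by_cases hj : j < tl.length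
    · exact ⟨j, List.mem_range.mpr hj, List.isPrefixOf_iff_prefix.mpr hp⟩
    · exfalso
      rw [List.drop_eq_nil_of_le (le_of_not_gt hj), List.prefix_nil] at hp
      exact h hp

-- the found-set contains a label iff one of its keywords occurs in the text
theorem pvFoundLabel (tl : List Char) (L : String) :
    (L ∈ (List.range tl.length).foldl (pvScanStep tl) PySem.Set.empty)
    ↔ ∃ kw ∈ pvKeywordTable, kw.2 = L ∧ PySem.Chars.isIn kw.1 tl = true := by
  rw [pvOuterMem]
  constructor
  · rintro (h | ⟨i, hi, kw, hkw, h2, h3⟩)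
    · simp [PySem.Set.empty] at h
    · exact ⟨kw, hkw, h2, (pvScanIff kw.1 tl (pvTableNonEmpty kw hkw)).mp ⟨i, hi, h3⟩⟩
  · rintro ⟨kw, hkw, h2, h3⟩
    obtain ⟨i, hi, hp⟩ := (pvScanIff kw.1 tl (pvTableNonEmpty kw hkw)).mpr h3
    exact Or.inr ⟨i, hi, kw, hkw, h2, hp⟩

-- the A-side let-chain and the B-side filter result, abstracted over the six tests
def pvChainA (c1 c2 c3 c4 c5 c6 : Bool) : List String :=
  let o : List String := []
  let o := if c1 then o ++ ["small_business"] else o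
  let o := if c2 then o ++ ["medium_business"] else o
  let o := if c3 then o ++ ["large_business"] else o
  let o := if c4 then o ++ ["startup"] else o
  let o := if c5 then o ++ ["company"] else o
  let o := if c6 then o ++ ["individual"] else o
  if o = [] then ["small_business"] else o

def pvChainB (c1 c2 c3 c4 c5 c6 : Bool) : List String :=
  let t6 : List String := if c6 = true then "individual" :: [] else []
  let t5 := if c5 = true then "company" :: t6 else t6
  let t4 := if c4 = true then "startup" :: t5 else t5
  let t3 := if c3 = true then "large_business" :: t4 else t4
  let t2 := if c2 = true then "medium_business" :: t3 else t3
  let out := if c1 = true then "small_business" :: t2 else t2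
  if out = [] then ["small_business"] else out

theorem pvChainEq (c1 c2 c3 c4 c5 c6 : Bool) :
    pvChainA c1 c2 c3 c4 c5 c6 = pvChainB c1 c2 c3 c4 c5 c6 := by
  cases c1 <;> cases c2 <;> cases c3 <;> cases c4 <;> cases c5 <;> cases c6 <;> decide

-- the found-set membership test for each label equals A's corresponding any-test
theorem pvLab1 (text : String) :
    PySem.Set.contains ((List.range (PySem.Str.lower text).toList.length).foldl
        (pvScanStep (PySem.Str.lower text).toList) PySem.Set.empty) "small_business"
    = ["small business", "sme"].any (fun w => PySem.Str.isIn w (PySem.Str.lower text)) := by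
  rw [Bool.eq_iff_iff, PySem.Set.contains_iff, pvFoundLabel]
  simp [pvKeywordTable, PySem.Str.isIn_eq]

theorem pvLab2 (text : String) :
    PySem.Set.contains ((List.range (PySem.Str.lower text).toList.length).foldl
        (pvScanStep (PySem.Str.lower text).toList) PySem.Set.empty) "medium_business"
    = ["medium business", "medium enterprise"].any (fun w => PySem.Str.isIn w (PySem.Str.lower text)) := by
  rw [Bool.eq_iff_iff, PySem.Set.contains_iff, pvFoundLabel]
  simp [pvKeywordTable, PySem.Str.isIn_eq]

theorem pvLab3 (text : String) :
    PySem.Set.contains ((List.range (PySem.Str.lower text).toList.length).foldl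
        (pvScanStep (PySem.Str.lower text).toList) PySem.Set.empty) "large_business"
    = ["large business", "large enterprise"].any (fun w => PySem.Str.isIn w (PySem.Str.lower text)) := by
  rw [Bool.eq_iff_iff, PySem.Set.contains_iff, pvFoundLabel]
  simp [pvKeywordTable, PySem.Str.isIn_eq]

theorem pvLab4 (text : String) :
    PySem.Set.contains ((List.range (PySem.Str.lower text).toList.length).foldl
        (pvScanStep (PySem.Str.lower text).toList) PySem.Set.empty) "startup"
    = ["startup", "start-up"].any (fun w => PySem.Str.isIn w (PySem.Str.lower text)) := by
  rw [Bool.eq_iff_iff, PySem.Set.contains_iff, pvFoundLabel]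
  simp [pvKeywordTable, PySem.Str.isIn_eq]

theorem pvLab5 (text : String) :
    PySem.Set.contains ((List.range (PySem.Str.lower text).toList.length).foldl
        (pvScanStep (PySem.Str.lower text).toList) PySem.Set.empty) "company"
    = ["company", "corporation"].any (fun w => PySem.Str.isIn w (PySem.Str.lower text)) := by
  rw [Bool.eq_iff_iff, PySem.Set.contains_iff, pvFoundLabel]
  simp [pvKeywordTable, PySem.Str.isIn_eq]

theorem pvLab6 (text : String) :
    PySem.Set.contains ((List.range (PySem.Str.lower text).toList.length).foldl
        (pvScanStep (PySem.Str.lower text).toList) PySem.Set.empty) "individual"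
    = ["individual", "sole trader"].any (fun w => PySem.Str.isIn w (PySem.Str.lower text)) := by
  rw [Bool.eq_iff_iff, PySem.Set.contains_iff, pvFoundLabel]
  simp [pvKeywordTable, PySem.Str.isIn_eq]

-- ===== VERDICT (by name: the statement is the Claim_ definition above) =====
theorem extract_org_types_py_spec : Claim_equal_extract_org_types_py := by
  intro text _
  unfold Spec_extract_org_types_py
  simp only [extract_org_types_py, extract_org_types_py_alt, pvLabels,
    List.filter_cons, List.filter_nil, pvLab1, pvLab2, pvLab3, pvLab4, pvLab5, pvLab6]
  exact pvChainEq _ _ _ _ _ _
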